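-- pv_equiv track=rewrite | github.com/agnul/AdventOfCode | 2025/python/day_07.py | part_1
-- ===== SOURCE A (Python) =====
-- def part_1(beams, rows):
--     splits = 0
--     for r, row in enumerate(rows):
--         new_beams = set()
--         for c, ch in enumerate(row):
--             if (r, c) not in beams:
--                 continue
--             if ch == "^":
--                 splits += 1
--                 new_beams.add((r + 1, c - 1))
--                 new_beams.add((r + 1, c + 1))
--             else:
--                 new_beams.add((r + 1, c))
--         beams = new_beams.copy()
--     return splits
-- ===== SOURCE B (Python) =====
-- def part_1(beams, rows):
--     # Iterate directly over beam columns (sorted) instead of scanning every column of every row.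
--     splits = 0
--     cols = {c for r, c in beams if r == 0}
--     for row in rows:
--         new_cols = set()
--         for c in sorted(cols):
--             if 0 <= c < len(row):
--                 if row[c] == "^":
--                     splits += 1
--                     new_cols.add(c - 1)
--                     new_cols.add(c + 1)
--                 else:
--                     new_cols.add(c)
--         cols = new_cols
--     return splits
-- ===== Notes on version B (the rewrite author's own statement) =====
-- stated objective: faster
-- what changed: B tracks only the set of current beam columns and iterates over those (sorted) with direct grid indexing, instead of A's scan of every column of every row with a membership test per cell.
import Mathlib
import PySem

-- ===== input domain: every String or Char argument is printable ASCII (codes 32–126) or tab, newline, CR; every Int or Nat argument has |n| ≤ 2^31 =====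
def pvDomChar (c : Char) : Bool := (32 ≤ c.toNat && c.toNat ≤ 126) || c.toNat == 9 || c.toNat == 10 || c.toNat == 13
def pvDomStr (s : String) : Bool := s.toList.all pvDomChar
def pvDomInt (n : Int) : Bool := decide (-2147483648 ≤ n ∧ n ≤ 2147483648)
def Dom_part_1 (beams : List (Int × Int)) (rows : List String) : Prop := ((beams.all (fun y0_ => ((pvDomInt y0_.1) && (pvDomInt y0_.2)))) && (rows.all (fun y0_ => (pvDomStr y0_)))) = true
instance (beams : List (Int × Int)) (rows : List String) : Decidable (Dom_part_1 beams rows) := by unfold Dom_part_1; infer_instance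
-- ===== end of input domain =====

-- B iterates only over the current beam columns (sorted) with indexed grid lookup instead of
-- scanning every column of every row; same return value everywhere.

-- ===== PORT A =====
-- inner-loop body of A: 'if (r, c) not in beams: continue; if ch == "^": …'
def aStep (r : Int) (bs : List (Int × Int)) (st : Int × PySem.Set (Int × Int)) (cc : Int × Char) : Int × PySem.Set (Int × Int) :=
  if (r, cc.1) ∈ bs then
    if cc.2 = '^' then
      (st.1 + 1, PySem.Set.add (PySem.Set.add st.2 (r + 1, cc.1 - 1)) (r + 1, cc.1 + 1))
    else
      (st.1, PySem.Set.add st.2 (r + 1, cc.1))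
  else st

-- one iteration of A's outer loop: 'new_beams = set(); for c, ch in enumerate(row): …'
def aRow (r : Int) (bs : List (Int × Int)) (row : List Char) (splits : Int) : Int × PySem.Set (Int × Int) :=
  (PySem.List.enumerate row 0).foldl (aStep r bs) (splits, PySem.Set.empty)

def part_1 (beams : List (Int × Int)) (rows : List String) : Int :=
  ((PySem.List.enumerate rows 0).foldl
    (fun st rr => aRow rr.1 st.2 rr.2.toList st.1) ((0 : Int), beams)).1

-- ===== PORT B =====
-- inner-loop body of B: 'if 0 <= c < len(row): if row[c] == "^": …'
-- (the range guard makes the indexing exact: pyGetD with the guard is Python's row[c])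
def bStep (row : List Char) (st : Int × PySem.Set Int) (c : Int) : Int × PySem.Set Int :=
  if 0 ≤ c ∧ c < (row.length : Int) then
    if PySem.List.pyGetD row c ' ' = '^' then
      (st.1 + 1, PySem.Set.add (PySem.Set.add st.2 (c - 1)) (c + 1))
    else
      (st.1, PySem.Set.add st.2 c)
  else st

-- one iteration of B's loop: 'new_cols = set(); for c in sorted(cols): …'
def bRow (row : List Char) (splits : Int) (cols : PySem.Set Int) : Int × PySem.Set Int :=
  (PySem.List.sorted cols (fun x => x) false).foldl (bStep row) (splits, PySem.Set.empty)

def part_1_alt (beams : List (Int × Int)) (rows : List String) : Int :=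
  (rows.foldl (fun st row => bRow row.toList st.1 st.2)
    ((0 : Int), PySem.Set.ofList ((beams.filter (fun p => p.1 == 0)).map (·.2)))).1

-- ===== PRECONDITION & SPEC =====
def Spec_part_1 (beams : List (Int × Int)) (rows : List String) (out : Int) : Prop := out = part_1_alt beams rows
instance (beams : List (Int × Int)) (rows : List String) (out : Int) : Decidable (Spec_part_1 beams rows out) := by unfold Spec_part_1; infer_instance

-- ===== CLAIM (what is proved, stated in full; the proofs are below) =====
def Claim_equal_part_1 : Prop := ∀ (beams : List (Int × Int)) (rows : List String), Dom_part_1 beams rows → Spec_part_1 beams rows (part_1 beams rows)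

-- ===== LEMMAS AND PROOFS =====

-- adding the image of a fresh element commutes with mapping the injective pairing (r+1, ·)
theorem map_pair_add (r : Int) (K : PySem.Set Int) (x : Int) :
    PySem.Set.add (K.map (fun c => (r, c))) (r, x) = (PySem.Set.add K x).map (fun c => (r, c)) := by
  by_cases hx : x ∈ K
  · rw [PySem.Set.add_of_mem (by simpa using hx), PySem.Set.add_of_mem hx]
  · rw [PySem.Set.add_of_not_mem (by simpa using hx), PySem.Set.add_of_not_mem hx, List.map_append]
    rfl

-- the common picked column list of one row
def picks (cols : PySem.Set Int) (n : Nat) : List Int :=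
  (PySem.List.sorted cols (fun x => x) false).filter (fun c => decide (0 ≤ c ∧ c < (n : Int)))

-- the ascending scan of A picks exactly B's sorted valid columns
theorem filter_range_eq (cols : PySem.Set Int) (hn : cols.Nodup) (n : Nat) :
    (PySem.List.pyRange 0 (n : Int) 1).filter (fun j => decide (j ∈ cols)) = picks cols n := by
  have hs1 : ((PySem.List.pyRange 0 (n : Int) 1).filter (fun j => decide (j ∈ cols))).Pairwise (· ≤ ·) :=
    ((PySem.List.pairwise_lt_pyRange_one 0 (n : Int)).imp le_of_lt).filter _
  have hs2 : (picks cols n).Pairwise (· ≤ ·) :=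
    (PySem.List.sorted_pairwise (xs := cols) (key := fun x => x)).filter _
  have hn1 : ((PySem.List.pyRange 0 (n : Int) 1).filter (fun j => decide (j ∈ cols))).Nodup :=
    (PySem.List.nodup_pyRange_one 0 (n : Int)).filter _
  have hn2 : (picks cols n).Nodup :=
    (((PySem.List.sorted_perm cols (fun x => x) false).nodup_iff).mpr hn).filter _
  refine List.Perm.eq_of_pairwise (fun a b _ _ hab hba => le_antisymm hab hba) hs1 hs2 ?_
  refine (List.perm_ext_iff_of_nodup hn1 hn2).mpr ?_
  intro j
  simp [picks, PySem.List.mem_pyRange_one, PySem.List.mem_sorted, and_comm]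

-- both inner folds, restricted to the common picked list, stay in lock-step
theorem pickfold (r : Int) (row : List Char) (P : List Int) (s : Int) (K : PySem.Set Int)
    (hK : K.Nodup) :
    (P.foldl (fun st j => aStep r [(r, j)] st (j, PySem.List.pyGetD row j ' '))
        (s, K.map (fun c => (r + 1, c)))).1
      = (P.foldl (fun st c =>
          if PySem.List.pyGetD row c ' ' = '^' then
            (st.1 + 1, PySem.Set.add (PySem.Set.add st.2 (c - 1)) (c + 1))
          else (st.1, PySem.Set.add st.2 c)) (s, K)).1 ∧
    (P.foldl (fun st j => aStep r [(r, j)] st (j, PySem.List.pyGetD row j ' '))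
        (s, K.map (fun c => (r + 1, c)))).2
      = (P.foldl (fun st c =>
          if PySem.List.pyGetD row c ' ' = '^' then
            (st.1 + 1, PySem.Set.add (PySem.Set.add st.2 (c - 1)) (c + 1))
          else (st.1, PySem.Set.add st.2 c)) (s, K)).2.map (fun c => (r + 1, c)) ∧
    (P.foldl (fun st c =>
          if PySem.List.pyGetD row c ' ' = '^' then
            (st.1 + 1, PySem.Set.add (PySem.Set.add st.2 (c - 1)) (c + 1))
          else (st.1, PySem.Set.add st.2 c)) (s, K)).2.Nodup := by
  induction P generalizing s K with
  | nil => exact ⟨rfl, rfl, hK⟩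
  | cons c P ih =>
    simp only [List.foldl_cons]
    by_cases hc : PySem.List.pyGetD row c ' ' = '^'
    · have h1 : aStep r [(r, c)] (s, K.map (fun c => (r + 1, c))) (c, PySem.List.pyGetD row c ' ')
          = (s + 1, (PySem.Set.add (PySem.Set.add K (c - 1)) (c + 1)).map (fun c => (r + 1, c))) := by
        simp only [aStep]
        rw [if_pos (List.mem_singleton.mpr rfl), if_pos hc, map_pair_add, map_pair_add]
      rw [h1, if_pos hc]
      exact ih _ _ (PySem.Set.nodup_add _ _ (PySem.Set.nodup_add _ _ hK))
    · have h1 : aStep r [(r, c)] (s, K.map (fun c => (r + 1, c))) (c, PySem.List.pyGetD row c ' ')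
          = (s, (PySem.Set.add K c).map (fun c => (r + 1, c))) := by
        simp only [aStep]
        rw [if_pos (List.mem_singleton.mpr rfl), if_neg hc, map_pair_add]
      rw [h1, if_neg hc]
      exact ih _ _ (PySem.Set.nodup_add _ _ hK)

-- one row of A equals one row of B, and the produced beam sets correspond
theorem row_eq (r : Int) (bs : List (Int × Int)) (cols : PySem.Set Int) (row : List Char)
    (splits : Int) (hn : cols.Nodup) (h : ∀ c, (r, c) ∈ bs ↔ c ∈ cols) :
    (aRow r bs row splits).1 = (bRow row splits cols).1 ∧
    (aRow r bs row splits).2 = (bRow row splits cols).2.map (fun c => (r + 1, c)) ∧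
    (bRow row splits cols).2.Nodup := by
  have hA : aRow r bs row splits
      = (picks cols row.length).foldl
          (fun st j => aStep r [(r, j)] st (j, PySem.List.pyGetD row j ' '))
          (splits, PySem.Set.empty) := by
    unfold aRow
    rw [PySem.List.enumerate_eq_map_pyRange row ' ', List.foldl_map]
    have hstep : (fun (st : Int × PySem.Set (Int × Int)) j =>
          aStep r bs st (j, PySem.List.pyGetD row j ' '))
        = fun st j => if (fun j => decide (j ∈ cols)) j = true
            then aStep r bs st (j, PySem.List.pyGetD row j ' ') else st := by
      funext st j
      by_cases hj : j ∈ cols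
      · simp [hj]
      · simp only [hj, decide_false, if_neg Bool.false_ne_true]
        simp only [aStep]
        rw [if_neg (fun hb => hj ((h j).mp hb))]
    rw [hstep, ← List.foldl_filter]
    have hlen : PySem.List.len row = ((row.length : Nat) : Int) := by simp [pysem]
    rw [hlen, filter_range_eq cols hn row.length]
    refine PySem.List.foldl_congr_mem _ _ _ _ ?_
    intro st j hj
    have hjc : j ∈ cols := by
      have := List.of_mem_filter hj
      simpa [picks, PySem.List.mem_sorted] using (PySem.List.mem_sorted _ _ _ _).mp (List.mem_of_mem_filter hj)
    simp only [aStep]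
    rw [if_pos ((h j).mpr hjc), if_pos (List.mem_singleton.mpr rfl)]
  have hB : bRow row splits cols
      = (picks cols row.length).foldl
          (fun st c =>
            if PySem.List.pyGetD row c ' ' = '^' then
              (st.1 + 1, PySem.Set.add (PySem.Set.add st.2 (c - 1)) (c + 1))
            else (st.1, PySem.Set.add st.2 c))
          (splits, PySem.Set.empty) := by
    unfold bRow
    have hstep : (bStep row)
        = fun st c => if (fun c => decide (0 ≤ c ∧ c < ((row.length : Nat) : Int))) c = true
            then (if PySem.List.pyGetD row c ' ' = '^' then
                    (st.1 + 1, PySem.Set.add (PySem.Set.add st.2 (c - 1)) (c + 1))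
                  else (st.1, PySem.Set.add st.2 c))
            else st := by
      funext st c
      by_cases hc : 0 ≤ c ∧ c < ((row.length : Nat) : Int)
      · simp [bStep, hc]
      · simp [bStep, hc]
    rw [hstep, ← List.foldl_filter]
    rfl
  rw [hA, hB]
  have := pickfold r row (picks cols row.length) splits PySem.Set.empty (List.nodup_nil)
  simpa using this

-- the outer loops agree given the row/column correspondence
theorem outer_eq (rows : List String) (s : Int) (splits : Int) (bs : List (Int × Int))
    (cols : PySem.Set Int) (hn : cols.Nodup) (h : ∀ c, (s, c) ∈ bs ↔ c ∈ cols) :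
    ((PySem.List.enumerate rows s).foldl
        (fun st rr => aRow rr.1 st.2 rr.2.toList st.1) (splits, bs)).1
      = (rows.foldl (fun st row => bRow row.toList st.1 st.2) (splits, cols)).1 := by
  induction rows generalizing s splits bs cols with
  | nil => rfl
  | cons row rows ih =>
    rw [PySem.List.enumerate_cons, List.foldl_cons, List.foldl_cons]
    dsimp only
    obtain ⟨h1, h2, h3⟩ := row_eq s bs cols row.toList splits hn h
    conv_lhs => rw [← Prod.mk.eta (p := aRow s bs row.toList splits)]
    conv_rhs => rw [← Prod.mk.eta (p := bRow row.toList splits cols)]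
    rw [h1, h2]
    exact ih (s + 1) _ _ _ h3 (fun c => by simp)

-- ===== VERDICT (by name: the statement is the Claim_ definition above) =====
theorem part_1_spec : Claim_equal_part_1 := by
  intro beams rows _
  show part_1 beams rows = part_1_alt beams rows
  unfold part_1 part_1_alt
  refine outer_eq rows 0 0 beams _ (PySem.Set.nodup_ofList _) ?_
  intro c
  simp only [PySem.Set.mem_ofList, List.mem_map, List.mem_filter]
  constructor
  · intro hb; exact ⟨(0, c), ⟨hb, by simp⟩, rfl⟩
  · rintro ⟨⟨pr, pc⟩, ⟨hp, h0⟩, rfl⟩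
    simp only [beq_iff_eq] at h0
    simpa [h0] using hp
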